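-- pv_equiv track=rewrite | github.com/jokeriigs/SqlParser | sqlParser/parse.py | getPrevChars
-- ===== SOURCE A (Python) =====
-- def getPrevChars(src, val):
--
--     rtn = []
--     startPos = -1
--
--     while True:
--         startPos = src.find(val, startPos+1)
--
--         if startPos == 0:
--             rtn.append(" ")
--         elif startPos > -1:
--             rtn.append(src[startPos -1: startPos])
--         else:
--             break
--
--     return rtn
-- ===== SOURCE B (Python) =====
-- def getPrevChars(src, val):
--     m = len(val)
--     out = []
--     for i in range(len(src) - m + 1):
--         if src[i:i+m] == val:
--             out.append(" " if i == 0 else src[i-1:i])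
--     return out
-- ===== Notes on version B (the rewrite author's own statement) =====
-- stated objective: simpler
-- what changed: Replaced the find-driven jumping while-loop (restarting str.find past each hit) by a single explicit positional scan: one pass over i in range(len(src)-m+1) comparing the slice src[i:i+m] to val and collecting ' ' or src[i-1:i] in index order.
import Mathlib
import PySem

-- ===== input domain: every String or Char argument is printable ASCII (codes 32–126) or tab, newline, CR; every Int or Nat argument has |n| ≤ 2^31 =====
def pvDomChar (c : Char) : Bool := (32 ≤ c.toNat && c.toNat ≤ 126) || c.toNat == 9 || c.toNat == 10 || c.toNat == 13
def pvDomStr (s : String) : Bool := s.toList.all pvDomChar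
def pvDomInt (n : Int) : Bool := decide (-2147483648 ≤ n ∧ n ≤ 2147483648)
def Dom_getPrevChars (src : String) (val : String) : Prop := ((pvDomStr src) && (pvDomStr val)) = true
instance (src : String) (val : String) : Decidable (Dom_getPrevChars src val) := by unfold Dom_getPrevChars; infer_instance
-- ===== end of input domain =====

-- B replaces A's find-driven jumping while-loop by a single explicit positional scan
-- (test every start index with a slice comparison); objective: simpler, same cost.

-- ===== PORT A =====

-- `src.find(val, k)` with k past the end of src is -1 (CPython quirk, kept by PySem).
theorem pvFindFrom_past (s v : List Char) (k : Nat) (hk : s.length < k) :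
    PySem.Chars.findFrom s v (k : Int) none = -1 := by
  simp only [PySem.Chars.findFrom]
  simp
  omega

-- Bounds on the result of `src.find(val, k)` for 0 ≤ k, needed for the
-- termination of the while-loop below (the loop restarts at result+1).
theorem pvFindFrom_bounds (s v : List Char) (k : Nat)
    (h : PySem.Chars.findFrom s v (k : Int) none ≠ -1) :
    k ≤ (PySem.Chars.findFrom s v (k : Int) none).toNat ∧
      (PySem.Chars.findFrom s v (k : Int) none).toNat ≤ s.length := by
  by_cases hk : k ≤ s.length
  · obtain ⟨h1, h2, h3⟩ := PySem.Chars.findFrom_natCast_spec s v k hk h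
    refine ⟨by omega, ?_⟩
    have hinf : v <:+: s.drop k := by
      by_contra hni
      exact h ((PySem.Chars.findFrom_natCast_eq_neg_one_iff s v k hk).2 hni)
    obtain ⟨a, b, hab⟩ := hinf
    have hp : v <+: s.drop (k + a.length) := by
      have hd : s.drop (k + a.length) = (s.drop k).drop a.length := by
        rw [List.drop_drop, Nat.add_comm]
      rw [hd, ← hab, List.append_assoc, List.drop_left]
      exact List.prefix_append v b
    have hlen : k + a.length ≤ s.length := by
      have := congrArg List.length hab
      simp [List.length_drop] at this
      omega
    by_contra hgt
    exact h3 (k + a.length) (by omega) (by omega) hp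
  · exact absurd (pvFindFrom_past s v k (by omega)) h

-- `while True: startPos = src.find(val, startPos+1); …` — the loop restarted
-- with `start` = previous hit + 1 (initially 0, i.e. -1 + 1).  The slice
-- src[p-1:p] with 1 ≤ p ≤ len(src) is exactly (drop (p-1)).take 1.
def pvALoop (s v : List Char) (start : Nat) : List String :=
  let r := PySem.Chars.findFrom s v (start : Int) none
  if h0 : r = 0 then
    " " :: pvALoop s v (r.toNat + 1)
  else if h1 : r > -1 then
    String.ofList ((s.drop (r.toNat - 1)).take 1) :: pvALoop s v (r.toNat + 1)
  else
    []
termination_by s.length + 1 - start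
decreasing_by
  · have h0' : PySem.Chars.findFrom s v (start : Int) none = 0 := h0
    have := pvFindFrom_bounds s v start (by rw [h0']; decide)
    omega
  · have := pvFindFrom_bounds s v start (by omega)
    omega

def getPrevChars (src : String) (val : String) : List String :=
  pvALoop src.toList val.toList 0

-- ===== PORT B =====

-- for i in range(len(src) - m + 1): collect the hits in index order.
-- Python's range(len(src)-m+1) has exactly (len(src)+1) - m elements
-- (empty when m > len(src)), which is the Nat subtraction below; the slice
-- src[i:i+m] is (drop i).take m and src[i-1:i] (1 ≤ i) is (drop (i-1)).take 1.
def getPrevChars_alt (src : String) (val : String) : List String :=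
  let s := src.toList
  let v := val.toList
  ((List.range (s.length + 1 - v.length)).filter
      (fun i => (s.drop i).take v.length == v)).map
    (fun i => if i = 0 then " " else String.ofList ((s.drop (i - 1)).take 1))

-- ===== PRECONDITION & SPEC =====
def Spec_getPrevChars (src : String) (val : String) (out : List String) : Prop := out = getPrevChars_alt src val
instance (src : String) (val : String) (out : List String) : Decidable (Spec_getPrevChars src val out) := by unfold Spec_getPrevChars; infer_instance

-- ===== CLAIM (what is proved, stated in full; the proofs are below) =====
def Claim_equal_getPrevChars : Prop := ∀ (src : String) (val : String), Dom_getPrevChars src val → Spec_getPrevChars src val (getPrevChars src val)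

-- ===== LEMMAS AND PROOFS =====

theorem pvMatch_iff (s v : List Char) (i : Nat) :
    ((s.drop i).take v.length == v) = true ↔ v <+: s.drop i := by
  rw [beq_iff_eq, List.prefix_iff_eq_take]
  exact ⟨fun h => h.symm, fun h => h.symm⟩

-- A prefix hit at i ≥ start is an infix of the suffix at start.
theorem pvInfix_of_prefix (s v : List Char) (start i : Nat) (hsi : start ≤ i)
    (h : v <+: s.drop i) : v <:+: s.drop start := by
  obtain ⟨t, ht⟩ := h
  have h2 : (s.drop start).drop (i - start) = s.drop i := by
    rw [List.drop_drop]; congr 1; omega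
  exact ⟨(s.drop start).take (i - start), t, by
    rw [List.append_assoc, ht, ← h2, List.take_append_drop]⟩

-- A's while-loop, started at `start`, returns exactly the hits at positions
-- start … len(s), in order.
theorem pvALoop_eq_aux (s v : List Char) :
    ∀ (n start : Nat), s.length + 1 - start ≤ n →
      pvALoop s v start =
        ((List.range' start (s.length + 1 - start)).filter
            (fun i => (s.drop i).take v.length == v)).map
          (fun i => if i = 0 then " " else String.ofList ((s.drop (i - 1)).take 1)) := by
  intro n
  induction n with
  | zero =>
    intro start h
    rw [pvALoop]
    have hneg := pvFindFrom_past s v start (by omega)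
    simp [hneg, show s.length + 1 - start = 0 by omega]
  | succ n ih =>
    intro start hstart_n
    by_cases hfar : s.length < start
    · rw [pvALoop]
      have hneg := pvFindFrom_past s v start hfar
      simp [hneg, show s.length + 1 - start = 0 by omega]
    · have hk : start ≤ s.length := by omega
      by_cases hr : PySem.Chars.findFrom s v (start : Int) none = -1
      · rw [pvALoop]
        simp only [hr]
        norm_num
        have hnomatch : ¬ v <:+: s.drop start :=
          (PySem.Chars.findFrom_natCast_eq_neg_one_iff s v start hk).1 hr
        intro i hi1 hi2 hP
        exact hnomatch (pvInfix_of_prefix s v start i hi1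
          (List.prefix_iff_eq_take.2 hP.symm))
      · obtain ⟨hge, hle⟩ := pvFindFrom_bounds s v start hr
        obtain ⟨h1, h2, h3⟩ := PySem.Chars.findFrom_natCast_spec s v start hk hr
        have hr0 : 0 ≤ PySem.Chars.findFrom s v (start : Int) none := by omega
        have hrval : PySem.Chars.findFrom s v (start : Int) none =
            ((PySem.Chars.findFrom s v (start : Int) none).toNat : Int) := by omega
        generalize hp : (PySem.Chars.findFrom s v (start : Int) none).toNat = p at *
        have hsplit : List.range' start (s.length + 1 - start) =
            List.range' start (p - start) ++
              List.range' (start + (p - start)) (s.length + 1 - start - (p - start)) := by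
          rw [List.range'_append_1]
          congr 1
          omega
        have hstep : start + (p - start) = p := by omega
        have hlen2 : s.length + 1 - start - (p - start) = (s.length - p) + 1 := by omega
        rw [hsplit, hstep, hlen2, List.filter_append]
        have hnil : (List.range' start (p - start)).filter
            (fun i => (s.drop i).take v.length == v) = [] := by
          rw [List.filter_eq_nil_iff]
          intro i hi
          rw [List.mem_range'_1] at hi
          intro hP
          exact h3 i (by omega) (by omega) ((pvMatch_iff s v i).1 (by simpa using hP))
        have hPp : ((s.drop p).take v.length == v) = true := (pvMatch_iff s v p).2 h2
        rw [hnil, List.nil_append, List.range'_succ, List.filter_cons]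
        simp only [hPp, if_true, List.map_cons]
        have hih := ih (p + 1) (by omega)
        have hlen3 : s.length + 1 - (p + 1) = s.length - p := by omega
        rw [hlen3] at hih
        rw [pvALoop]
        by_cases hp0 : p = 0
        · subst hp0
          have h0 : PySem.Chars.findFrom s v (start : Int) none = 0 := by omega
          simp only [h0]
          norm_num
          simpa using hih
        · simp only [hrval]
          rw [dif_neg (show ¬ ((p : Int) = 0) by omega), dif_pos (show (p : Int) > -1 by omega)]
          simp only [Int.toNat_natCast]
          rw [hih]
          simp [hp0]

theorem pvALoop_eq (s v : List Char) (start : Nat) :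
    pvALoop s v start =
      ((List.range' start (s.length + 1 - start)).filter
          (fun i => (s.drop i).take v.length == v)).map
        (fun i => if i = 0 then " " else String.ofList ((s.drop (i - 1)).take 1)) :=
  pvALoop_eq_aux s v (s.length + 1 - start) start le_rfl

theorem pvFilter_range_eq (s v : List Char) :
    (List.range' 0 (s.length + 1)).filter
        (fun i => (s.drop i).take v.length == v) =
      (List.range (s.length + 1 - v.length)).filter
        (fun i => (s.drop i).take v.length == v) := by
  rw [List.range_eq_range']
  have hsplit : List.range' 0 (s.length + 1) =
      List.range' 0 (s.length + 1 - v.length) ++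
        List.range' (0 + (s.length + 1 - v.length)) (s.length + 1 - (s.length + 1 - v.length)) := by
    rw [List.range'_append_1]
    congr 1
    omega
  rw [hsplit, List.filter_append]
  have hnil : (List.range' (0 + (s.length + 1 - v.length))
      (s.length + 1 - (s.length + 1 - v.length))).filter
        (fun i => (s.drop i).take v.length == v) = [] := by
    rw [List.filter_eq_nil_iff]
    intro i hi
    rw [List.mem_range'_1] at hi
    simp only [beq_iff_eq]
    intro hcontra
    have hlen := congrArg List.length hcontra
    simp only [List.length_take, List.length_drop] at hlen
    omega
  rw [hnil, List.append_nil]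

-- ===== VERDICT (by name: the statement is the Claim_ definition above) =====
theorem getPrevChars_spec : Claim_equal_getPrevChars := by
  intro src val _
  show getPrevChars src val = getPrevChars_alt src val
  unfold getPrevChars getPrevChars_alt
  rw [pvALoop_eq, Nat.sub_zero, pvFilter_range_eq]
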